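-- pv_equiv track=rewrite | github.com/siegelzero/rosemary | number_theory/core.py | integer_log
-- ===== SOURCE A (Python) =====
-- def integer_log(b, n):
--     """
--     Returns the base-b integer logarithm of n.
--
--     Given a positive integers n and base b, this function returns the integer k
--     such that b**k <= a < b**(k + 1).
--
--     Input:
--         * b: int (b >= 2)
--             The base of the logarithm.
--
--         * n: int (n >= 1)
--             The argument of the logarithm.
--
--     Output:
--         * k: int
--             The integer such that b**k <= a <= b**(k + 1).
--
--     Examples:
--         >>> integer_log(2, 100)
--         6
--         >>> integer_log(5, 30)
--         2
--
--     Details: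
--         This function computes powers b, b**2, b**4, b**8, b**16, ..., and then
--         performs a binary search. This gives the algorithm a logarithmic runtime
--         instead of the linear runtime of the naive search method.
--     """
--     if b <= 1:
--         raise ValueError("integer_log: Must have b >= 2.")
--     if n <= 0:
--         raise ValueError("integer_log: Must have n >= 1.")
--
--     if n < b:
--         return 0
--
--     p = b
--     hi = 1
--     # Look at b, b^2, b^4, b^8,... to find in which interval a lives
--     while p <= n:
--         p = p**2
--         lo = hi
--         hi *= 2
--     # Now we know that b^lo <= a <= b^hi perform a binary search on this
--     # interval to find the exact value n so that b^n <= a < b^(n + 1)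
--     while hi - lo > 1:
--         mid = (lo + hi) // 2
--         if b**mid > n:
--             hi = mid
--         else:
--             lo = mid
--     return lo
-- ===== SOURCE B (Python) =====
-- def integer_log(b, n):
--     if b <= 1:
--         raise ValueError("integer_log: Must have b >= 2.")
--     if n <= 0:
--         raise ValueError("integer_log: Must have n >= 1.")
--     k = 0
--     p = b
--     while p <= n:
--         p *= b
--         k += 1
--     return k
-- ===== Notes on version B (the rewrite author's own statement) =====
-- stated objective: simpler
-- what changed: Replaces the repeated-squaring bracketing plus binary search with a single linear loop that multiplies p by b until p exceeds n, counting the steps.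
import Mathlib
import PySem

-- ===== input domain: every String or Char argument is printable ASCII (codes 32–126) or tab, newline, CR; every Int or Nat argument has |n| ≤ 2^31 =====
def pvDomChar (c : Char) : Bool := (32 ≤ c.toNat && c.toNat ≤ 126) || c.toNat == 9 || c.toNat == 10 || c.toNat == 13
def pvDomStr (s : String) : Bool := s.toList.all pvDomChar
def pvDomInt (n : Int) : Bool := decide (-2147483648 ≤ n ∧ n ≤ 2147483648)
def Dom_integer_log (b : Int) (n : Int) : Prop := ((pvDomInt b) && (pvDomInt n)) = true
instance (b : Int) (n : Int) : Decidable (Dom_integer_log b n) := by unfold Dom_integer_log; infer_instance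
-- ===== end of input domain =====

-- B replaces A's repeated-squaring bracketing + binary search by one linear loop
-- multiplying by b; objective: simpler.

-- ===== PORT A =====
-- doubling loop: while p <= n: p = p**2; lo = hi; hi *= 2
-- (the '2 ≤ p' conjunct only guarantees termination; on every input admitted by
-- Pre_integer_log we have 2 ≤ b ≤ p, so it never changes the computation)
def pvDblLoop (n p lo hi : Int) : Int × Int :=
  if _h : p ≤ n ∧ 2 ≤ p then pvDblLoop n (p ^ 2) hi (hi * 2) else (lo, hi)
  termination_by (n + 1 - p).toNat
  decreasing_by
    have hp : p < p ^ 2 := by nlinarith [_h.2]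
    omega

-- binary search: while hi - lo > 1: mid = (lo+hi)//2; if b**mid > n: hi = mid else lo = mid
-- (b**mid is ported as b ^ mid.toNat: on every reachable state mid ≥ 1, exact there)
def pvBsLoop (b n lo hi : Int) : Int :=
  if _h : hi - lo > 1 then
    let mid := PySem.Int.floordiv (lo + hi) 2
    if b ^ mid.toNat > n then pvBsLoop b n lo mid else pvBsLoop b n mid hi
  else lo
  termination_by (hi - lo).toNat
  decreasing_by
    all_goals
      have hm : PySem.Int.floordiv (lo + hi) 2 = (lo + hi) / 2 :=
        PySem.Int.floordiv_eq_ediv_of_pos (by omega)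
      omega

def integer_log (b : Int) (n : Int) : Int :=
  if b ≤ 1 then 0        -- Python raises ValueError here; excluded by Pre_integer_log
  else if n ≤ 0 then 0   -- Python raises ValueError here; excluded by Pre_integer_log
  else if n < b then 0
  else
    -- Python's lo is unassigned before the loop; the loop always runs here (b ≤ n),
    -- so the initial 0 passed for lo is a dummy that is overwritten on the first pass
    let r := pvDblLoop n b 0 1
    pvBsLoop b n r.1 r.2

-- ===== PORT B =====
-- while p <= n: p *= b; k += 1
-- ('2 ≤ b ∧ 1 ≤ p' only guarantees termination; under Pre_integer_log it always holds)
def pvLinLoop (b n p k : Int) : Int :=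
  if h : p ≤ n ∧ 2 ≤ b ∧ 1 ≤ p then pvLinLoop b n (p * b) (k + 1) else k
  termination_by (n + 1 - p).toNat
  decreasing_by
    have hp : p < p * b := by nlinarith [h.2.1, h.2.2]
    omega

def integer_log_alt (b : Int) (n : Int) : Int :=
  if b ≤ 1 then 0        -- Python raises ValueError here; excluded by Pre_integer_log
  else if n ≤ 0 then 0   -- Python raises ValueError here; excluded by Pre_integer_log
  else pvLinLoop b n b 0

-- ===== PRECONDITION & SPEC =====
-- Exactly the inputs on which the Python A returns (it raises ValueError on b ≤ 1 or n ≤ 0).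
def Pre_integer_log (b : Int) (n : Int) : Prop := 2 ≤ b ∧ 1 ≤ n
instance (b : Int) (n : Int) : Decidable (Pre_integer_log b n) := by unfold Pre_integer_log; infer_instance
def pvWitness_integer_log : Int × Int := (2, 100)

def Spec_integer_log (b : Int) (n : Int) (out : Int) : Prop := out = integer_log_alt b n
instance (b : Int) (n : Int) (out : Int) : Decidable (Spec_integer_log b n out) := by unfold Spec_integer_log; infer_instance

-- ===== CLAIM (what is proved, stated in full; the proofs are below) =====
def Claim_equal_integer_log : Prop := ∀ (b : Int) (n : Int), Dom_integer_log b n → Pre_integer_log b n → Spec_integer_log b n (integer_log b n)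

-- ===== LEMMAS AND PROOFS =====

theorem pvPow_le_pow {b : Int} (hb : 2 ≤ b) {i j : Nat} (h : i ≤ j) : b ^ i ≤ b ^ j :=
  pow_le_pow_right₀ (by omega) h

-- the integer logarithm is unique
theorem pvLogUniq {b n : Int} (hb : 2 ≤ b) {m k : Nat}
    (h1 : b ^ m ≤ n) (h2 : n < b ^ (m + 1)) (h3 : b ^ k ≤ n) (h4 : n < b ^ (k + 1)) :
    m = k := by
  rcases lt_trichotomy m k with h | h | h
  · exact absurd (lt_of_le_of_lt h3 h2) (not_lt.2 (pvPow_le_pow hb (by omega)))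
  · exact h
  · exact absurd (lt_of_le_of_lt h1 h4) (not_lt.2 (pvPow_le_pow hb (by omega)))

theorem pvLinLoop_spec {b n : Int} (hb : 2 ≤ b) :
    ∀ (N : Nat) (p k : Int) (κ : Nat), (n + 1 - p).toNat ≤ N →
    p = b ^ (κ + 1) → k = (κ : Int) → b ^ κ ≤ n →
    ∃ m : Nat, pvLinLoop b n p k = (m : Int) ∧ b ^ m ≤ n ∧ n < b ^ (m + 1) := by
  intro N
  induction N with
  | zero =>
    intro p k κ hN hp hk hle
    rw [pvLinLoop]
    have hpos : (1 : Int) ≤ p := hp ▸ one_le_pow₀ (by omega)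
    have hpn : ¬ p ≤ n := by omega
    rw [dif_neg (by tauto)]
    exact ⟨κ, hk, hle, by omega⟩
  | succ N ih =>
    intro p k κ hN hp hk hle
    rw [pvLinLoop]
    have hpos : (1 : Int) ≤ p := hp ▸ one_le_pow₀ (by omega)
    split_ifs with hcond
    · have hlt : p < p * b := by nlinarith
      exact ih (p * b) (k + 1) (κ + 1) (by omega)
        (by rw [hp]; ring) (by omega) (by rw [← hp]; exact hcond.1)
    · have hpn : ¬ p ≤ n := by tauto
      exact ⟨κ, hk, hle, by rw [← hp]; omega⟩

theorem pvDblLoop_spec {b n : Int} (hb : 2 ≤ b) :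
    ∀ (N : Nat) (p lo hi : Int) (l h : Nat), (n + 1 - p).toNat ≤ N →
    p = b ^ h → lo = (l : Int) → hi = (h : Int) → l < h → b ^ l ≤ n →
    ∃ l' h' : Nat, pvDblLoop n p lo hi = ((l' : Int), (h' : Int)) ∧
      l' < h' ∧ b ^ l' ≤ n ∧ n < b ^ h' := by
  intro N
  induction N with
  | zero =>
    intro p lo hi l h hN hp hlo hhi hlh hle
    rw [pvDblLoop]
    have hpos : (2 : Int) ≤ p := by
      rw [hp]; calc (2:Int) = 2 ^ 1 := by norm_num
        _ ≤ b ^ 1 := by simpa using hb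
        _ ≤ b ^ h := pvPow_le_pow hb (by omega)
    have hpn : ¬ p ≤ n := by omega
    rw [dif_neg (by tauto)]
    exact ⟨l, h, by rw [hlo, hhi], hlh, hle, by rw [← hp]; omega⟩
  | succ N ih =>
    intro p lo hi l h hN hp hlo hhi hlh hle
    rw [pvDblLoop]
    have hpos : (2 : Int) ≤ p := by
      rw [hp]; calc (2:Int) = 2 ^ 1 := by norm_num
        _ ≤ b ^ 1 := by simpa using hb
        _ ≤ b ^ h := pvPow_le_pow hb (by omega)
    split_ifs with hcond
    · have hlt : p < p ^ 2 := by nlinarith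
      exact ih (p ^ 2) hi (hi * 2) h (2 * h) (by omega)
        (by rw [hp]; ring) hhi (by push_cast [hhi]; ring) (by omega)
        (by rw [← hp]; exact hcond.1)
    · have hpn : ¬ p ≤ n := by tauto
      exact ⟨l, h, by rw [hlo, hhi], hlh, hle, by rw [← hp]; omega⟩

theorem pvBsLoop_spec {b n : Int} (hb : 2 ≤ b) :
    ∀ (N : Nat) (lo hi : Int) (l h : Nat), (hi - lo).toNat ≤ N →
    lo = (l : Int) → hi = (h : Int) → l < h → b ^ l ≤ n → n < b ^ h →
    ∃ m : Nat, pvBsLoop b n lo hi = (m : Int) ∧ b ^ m ≤ n ∧ n < b ^ (m + 1) := by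
  intro N
  induction N with
  | zero =>
    intro lo hi l h hN hlo hhi hlh hle hlt
    omega
  | succ N ih =>
    intro lo hi l h hN hlo hhi hlh hle hlt
    rw [pvBsLoop]
    split_ifs with hgap
    · -- hi - lo > 1 : recurse on one half
      have hfd : PySem.Int.floordiv (lo + hi) 2 = (lo + hi) / 2 :=
        PySem.Int.floordiv_eq_ediv_of_pos (by omega)
      have hmid : PySem.Int.floordiv (lo + hi) 2 = (((l + h) / 2 : Nat) : Int) := by
        rw [hfd, hlo, hhi]
        omega
      have hb1 : l < (l + h) / 2 ∧ (l + h) / 2 < h := by omega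
      rw [hmid]
      simp only [Int.toNat_natCast]
      split_ifs with hcmp
      · exact ih lo (((l + h) / 2 : Nat) : Int) l ((l + h) / 2
          ) (by omega) hlo rfl hb1.1 hle (by omega)
      · exact ih (((l + h) / 2 : Nat) : Int) hi ((l + h) / 2) h
          (by omega) rfl hhi hb1.2 (by omega) hlt
    · -- hi - lo ≤ 1 with l < h forces h = l + 1
      have : h = l + 1 := by omega
      exact ⟨l, hlo, hle, by rw [← this]; exact hlt⟩

theorem integer_log_char {b n : Int} (hb : 2 ≤ b) (hn : 1 ≤ n) :
    ∃ m : Nat, integer_log b n = (m : Int) ∧ b ^ m ≤ n ∧ n < b ^ (m + 1) := by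
  unfold integer_log
  rw [if_neg (by omega), if_neg (by omega)]
  split_ifs with hnb
  · exact ⟨0, rfl, by simpa using hn, by simpa using hnb⟩
  · obtain ⟨l', h', heq, hlh, hle, hlt⟩ :=
      pvDblLoop_spec hb (n + 1 - b).toNat b 0 1 0 1 (le_refl _)
        (by ring) rfl rfl (by omega) (by simpa using hn)
    rw [heq]
    exact pvBsLoop_spec hb ((h' : Int) - (l' : Int)).toNat _ _ l' h' (le_refl _)
      rfl rfl hlh hle hlt

theorem integer_log_alt_char {b n : Int} (hb : 2 ≤ b) (hn : 1 ≤ n) :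
    ∃ m : Nat, integer_log_alt b n = (m : Int) ∧ b ^ m ≤ n ∧ n < b ^ (m + 1) := by
  unfold integer_log_alt
  rw [if_neg (by omega), if_neg (by omega)]
  exact pvLinLoop_spec hb (n + 1 - b).toNat b 0 0 (le_refl _)
    (by ring) rfl (by simpa using hn)

-- ===== VERDICT (by name: the statement is the Claim_ definition above) =====
theorem integer_log_spec : Claim_equal_integer_log := by
  intro b n _ hpre
  obtain ⟨hb, hn⟩ := hpre
  obtain ⟨m, hmeq, hm1, hm2⟩ := integer_log_char hb hn
  obtain ⟨k, hkeq, hk1, hk2⟩ := integer_log_alt_char hb hn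
  unfold Spec_integer_log
  rw [hmeq, hkeq, pvLogUniq hb hm1 hm2 hk1 hk2]
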